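-- pv_equiv track=rewrite | github.com/tomoya0318/PM25 | src/pattern/convert_code_into_pattern.py | merge_consecutive_tokens
-- ===== SOURCE A (Python) =====
-- def merge_consecutive_tokens(diff):
--     """連続するトークンを結合する．
--
--     Args:
--         diff (list): トークンのリスト
--
--     Returns:
--         list: 結合されたトークンのリスト
--     """
--     if not diff:
--         return []
--
--     merged_diff = []
--     current_token = diff[0]
--
--     for token in diff[1:]:
--         if current_token.startswith(("-", "+", "=")) and token.startswith(current_token[0]):
--             current_token += token[1:]
--             continue
--         merged_diff.append(current_token)
--         current_token = token
--
--     merged_diff.append(current_token)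
--     return merged_diff
-- ===== SOURCE B (Python) =====
-- def merge_consecutive_tokens(diff):
--     """連続するトークンを結合する．(span-based: find each run of same-prefix tokens, then join)"""
--     def key(t):
--         return t[0] if t and t[0] in "+-=" else None
--
--     merged = []
--     i, n = 0, len(diff)
--     while i < n:
--         k = key(diff[i])
--         j = i + 1
--         if k is not None:
--             while j < n and key(diff[j]) == k:
--                 j += 1
--         merged.append(diff[i] + "".join(t[1:] for t in diff[i + 1:j]))
--         i = j
--     return merged
-- ===== Notes on version B (the rewrite author's own statement) =====
-- stated objective: alternative
-- what changed: Replaced A's single scan with a running accumulator (current_token grows as matching tokens arrive) by a run-partitioning structure: an outer loop that finds the span of each run of tokens sharing a mergeable first character and emits the run's head plus the join of the tails of the rest in one step.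
import Mathlib
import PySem

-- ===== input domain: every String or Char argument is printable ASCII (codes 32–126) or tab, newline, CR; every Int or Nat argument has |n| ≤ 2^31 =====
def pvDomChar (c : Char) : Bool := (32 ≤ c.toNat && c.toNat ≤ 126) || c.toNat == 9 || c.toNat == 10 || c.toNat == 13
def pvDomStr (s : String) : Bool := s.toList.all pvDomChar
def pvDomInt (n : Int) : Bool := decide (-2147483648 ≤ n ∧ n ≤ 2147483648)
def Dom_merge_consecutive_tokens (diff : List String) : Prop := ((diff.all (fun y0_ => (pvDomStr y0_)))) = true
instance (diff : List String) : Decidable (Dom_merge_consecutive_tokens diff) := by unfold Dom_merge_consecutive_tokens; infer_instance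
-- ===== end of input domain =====

-- B restates A's running-accumulator scan as a run-partitioning loop (same cost); equivalence proved on all inputs.

-- ===== PORT A =====
-- current_token.startswith(("-","+","=")) and token.startswith(current_token[0]):
-- the tuple-startswith is "cur is nonempty and its head is '-','+' or '='", and under that
-- guard current_token[0] is that head, so token.startswith(current_token[0]) is
-- "t starts with cur's head" (exact; Python's short-circuit is kept by the match on cur).
def pvMergeableA (cur t : List Char) : Bool :=
  match cur with
  | [] => false
  | c :: _ => (c == '-' || c == '+' || c == '=') && PySem.Chars.startswith t [c]

-- A's for-loop over diff[1:], carrying current_token; token[1:] on code points is drop 1.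
def pvLoopA (cur : List Char) (rest : List (List Char)) : List (List Char) :=
  match rest with
  | [] => [cur]
  | t :: rs =>
    if pvMergeableA cur t then pvLoopA (cur ++ t.drop 1) rs
    else cur :: pvLoopA t rs

def merge_consecutive_tokens (diff : List String) : List String :=
  match diff.map (fun s => s.toList) with
  | [] => []
  | d :: rest => (pvLoopA d rest).map (fun cs => String.ofList cs)

-- ===== PORT B =====
-- Source B's key(t): t[0] if t and t[0] in "+-=" else None
def pvKeyB (t : List Char) : Option Char :=
  match t with
  | c :: _ => if c == '+' || c == '-' || c == '=' then some c else none
  | [] => none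

-- Source B's outer while-loop: the inner "while j < n and key(diff[j]) == k" index scan
-- delimits the takeWhile/dropWhile span of the run; diff[i] + "".join(t[1:] for t in ...)
-- is the run's head ++ the flattened tails of the rest of the run.
def pvGoB (tokens : List (List Char)) : List (List Char) :=
  match tokens with
  | [] => []
  | t :: rest =>
    match pvKeyB t with
    | some c =>
      (t ++ ((rest.takeWhile (fun u => pvKeyB u == some c)).map (fun u => u.drop 1)).flatten)
        :: pvGoB (rest.dropWhile (fun u => pvKeyB u == some c))
    | none => t :: pvGoB rest
termination_by tokens.length
decreasing_by
  · exact Nat.lt_succ_of_le (List.length_dropWhile_le _ _)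
  · exact Nat.lt_succ_self _

def merge_consecutive_tokens_alt (diff : List String) : List String :=
  (pvGoB (diff.map (fun s => s.toList))).map (fun cs => String.ofList cs)

-- ===== PRECONDITION & SPEC =====
def Spec_merge_consecutive_tokens (diff : List String) (out : List String) : Prop := out = merge_consecutive_tokens_alt diff
instance (diff : List String) (out : List String) : Decidable (Spec_merge_consecutive_tokens diff out) := by unfold Spec_merge_consecutive_tokens; infer_instance

-- ===== CLAIM (what is proved, stated in full; the proofs are below) =====
def Claim_equal_merge_consecutive_tokens : Prop := ∀ (diff : List String), Dom_merge_consecutive_tokens diff → Spec_merge_consecutive_tokens diff (merge_consecutive_tokens diff)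

-- ===== LEMMAS AND PROOFS =====

-- A's merge condition fires exactly when cur and t share the same mergeable key.
lemma pvMergeableA_eq_key (cur t : List Char) :
    pvMergeableA cur t = true ↔ ∃ c, pvKeyB cur = some c ∧ pvKeyB t = some c := by
  cases cur with
  | nil => simp [pvMergeableA, pvKeyB]
  | cons c cs =>
    cases t with
    | nil =>
      simp only [pvMergeableA, pvKeyB, PySem.Chars.startswith, List.isPrefixOf]
      constructor
      · intro h; simp at h
      · rintro ⟨x, -, hx⟩; exact absurd hx (by simp)
    | cons d ds =>
      simp only [pvMergeableA, pvKeyB, PySem.Chars.startswith, List.isPrefixOf]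
      by_cases hcd : c = d
      · subst hcd
        by_cases hc : c = '+' ∨ c = '-' ∨ c = '='
        · rcases hc with rfl|rfl|rfl <;> simp
        · have h1 : (c == '+' || c == '-' || c == '=') = false := by
            simp only [Bool.or_eq_false_iff, beq_eq_false_iff_ne]; tauto
          have h2 : (c == '-' || c == '+' || c == '=') = false := by
            simp only [Bool.or_eq_false_iff, beq_eq_false_iff_ne]; tauto
          simp [h1, h2]
      · have h3 : (c == d) = false ∧ (d == c) = false := by simp [hcd, Ne.symm hcd]
        simp only [h3.1, Bool.false_and, Bool.and_false, Bool.false_eq_true, false_iff]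
        rintro ⟨x, hx, hd⟩
        have hc2 : c = x := by revert hx; split <;> intro hx <;> simp_all
        have hd2 : d = x := by revert hd; split <;> intro hd <;> simp_all
        exact hcd (hc2.trans hd2.symm)

-- the one-step unfolding of pvGoB on a cons (well-founded equation, packaged for rw)
lemma pvGoB_cons (t : List Char) (rs : List (List Char)) :
    pvGoB (t :: rs) =
      match pvKeyB t with
      | some c =>
        (t ++ ((rs.takeWhile (fun u => pvKeyB u == some c)).map (fun u => u.drop 1)).flatten)
          :: pvGoB (rs.dropWhile (fun u => pvKeyB u == some c))
      | none => t :: pvGoB rs := by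
  rw [pvGoB]

-- appending a tail does not change the (head-based) key of a nonempty cur
lemma pvKeyB_append (cur x : List Char) (c : Char) (h : pvKeyB cur = some c) :
    pvKeyB (cur ++ x) = some c := by
  cases cur with
  | nil => simp [pvKeyB] at h
  | cons a as => simpa [pvKeyB] using h

-- the central invariant: A's scan from current token cur equals B's run decomposition
lemma pvLoopA_eq (rest : List (List Char)) (cur : List Char) :
    pvLoopA cur rest =
      match pvKeyB cur with
      | some c =>
        (cur ++ ((rest.takeWhile (fun u => pvKeyB u == some c)).map (fun u => u.drop 1)).flatten)
          :: pvGoB (rest.dropWhile (fun u => pvKeyB u == some c))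
      | none => cur :: pvGoB rest := by
  induction rest generalizing cur with
  | nil => cases h : pvKeyB cur <;> simp [pvLoopA, pvGoB]
  | cons t rs ih =>
    cases hcur : pvKeyB cur with
    | none =>
      have hm : pvMergeableA cur t = false := by
        rw [← Bool.not_eq_true, pvMergeableA_eq_key]
        rintro ⟨c, hc, -⟩; simp [hcur] at hc
      simp only [pvLoopA, hm, Bool.false_eq_true, if_false]
      rw [ih t, pvGoB_cons]
    | some c =>
      by_cases ht : pvKeyB t = some c
      · have hm : pvMergeableA cur t = true := (pvMergeableA_eq_key cur t).mpr ⟨c, hcur, ht⟩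
        simp only [pvLoopA, hm, if_true]
        rw [ih (cur ++ t.drop 1), pvKeyB_append cur _ c hcur]
        simp [ht, List.append_assoc]
      · have hm : pvMergeableA cur t = false := by
          rw [← Bool.not_eq_true, pvMergeableA_eq_key]
          rintro ⟨c', hc', ht'⟩
          rw [hcur] at hc'; obtain rfl : c = c' := by injection hc'
          exact ht ht'
        have hne : (pvKeyB t == some c) = false := by simp [ht]
        simp only [pvLoopA, hm, Bool.false_eq_true, if_false]
        rw [ih t, ← pvGoB_cons]
        simp [hne]

-- ===== VERDICT (by name: the statement is the Claim_ definition above) =====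
theorem merge_consecutive_tokens_spec : Claim_equal_merge_consecutive_tokens := by
  intro diff _
  unfold Spec_merge_consecutive_tokens merge_consecutive_tokens merge_consecutive_tokens_alt
  cases h : diff.map (fun s => s.toList) with
  | nil => simp [pvGoB]
  | cons d rest =>
    dsimp only
    rw [pvLoopA_eq rest d, pvGoB_cons]
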